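-- pv_equiv track=rewrite | github.com/Oldzc/Skin-Disease-Diagnosis-System | scripts/run_experiment_suite.py | _extract_top_labels_from_text
-- ===== SOURCE A (Python) =====
-- def _extract_top_labels_from_text(text: str, labels: list[str]) -> list[str]:
--     lowered = text.lower()
--     hits: list[tuple[int, str]] = []
--     for lb in labels:
--         candidates = {
--             lb.lower(),
--             lb.lower().replace("_", " "),
--             lb.lower().replace("_", ""),
--         }
--         idx_list = [lowered.find(c) for c in candidates if c]
--         idx_list = [i for i in idx_list if i >= 0]
--         if idx_list:
--             hits.append((min(idx_list), lb))
--     hits.sort(key=lambda x: x[0])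
--     ordered = [lb for _, lb in hits]
--     dedup: list[str] = []
--     for lb in ordered:
--         if lb not in dedup:
--             dedup.append(lb)
--     return dedup
-- ===== SOURCE B (Python) =====
-- def _extract_top_labels_from_text(text: str, labels: list[str]) -> list[str]:
--     # Single left-to-right scan over the text: emit each label the first time one of
--     # its variants matches at the current position (no sort, no post-hoc dedup).
--     lowered = text.lower()
--     pending = []  # (label, variant patterns), distinct labels in first-seen order
--     seen = set()
--     for lb in labels:
--         if lb in seen:
--             continue
--         seen.add(lb)
--         low = lb.lower()
--         pats = [p for p in dict.fromkeys([low, low.replace("_", " "), low.replace("_", "")]) if p]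
--         if pats:
--             pending.append((lb, pats))
--     result = []
--     for i in range(len(lowered)):
--         still = []
--         for lb, pats in pending:
--             if any(lowered.startswith(p, i) for p in pats):
--                 result.append(lb)
--             else:
--                 still.append((lb, pats))
--         pending = still
--     return result
-- ===== Notes on version B (the rewrite author's own statement) =====
-- stated objective: alternative
-- what changed: Replaces A's per-label str.find over candidate variants followed by a stable sort on first-index and a final dedup pass with a single left-to-right positional scan of the text that checks the still-pending (pre-deduplicated) labels' variants at each position and emits a label the first time one of its variants matches, so first-occurrence order, tie-breaking and deduplication fall out of the traversal itself; the explicit scan runs in interpreted Python, so it is slower than A's C-accelerated find on large inputs.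
import Mathlib
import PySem

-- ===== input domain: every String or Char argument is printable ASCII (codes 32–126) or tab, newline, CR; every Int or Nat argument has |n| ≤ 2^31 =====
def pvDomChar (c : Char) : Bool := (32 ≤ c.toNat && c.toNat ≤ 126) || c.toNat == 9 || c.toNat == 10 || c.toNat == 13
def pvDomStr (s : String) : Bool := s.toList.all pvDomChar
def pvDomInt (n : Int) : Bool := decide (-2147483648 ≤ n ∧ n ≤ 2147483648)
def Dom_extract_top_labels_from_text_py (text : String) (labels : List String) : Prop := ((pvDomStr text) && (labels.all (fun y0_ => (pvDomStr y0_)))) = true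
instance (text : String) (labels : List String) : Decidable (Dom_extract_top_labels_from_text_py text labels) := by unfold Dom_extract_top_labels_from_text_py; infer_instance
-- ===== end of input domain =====

-- B replaces A's find+stable-sort+dedup pipeline with a single left-to-right scan of the
-- text that emits each pending label the first time one of its variants matches (alternative
-- decomposition, same asymptotic cost).

-- ===== PORT A =====
-- the Python set literal {lb.lower(), …}; the comprehension below only takes min/emptiness
-- of the finds, which do not depend on the set's (hash) iteration order
def aCandidates (lb : String) : PySem.Set String :=
  PySem.Set.ofList [PySem.Str.lower lb,
    PySem.Str.replace (PySem.Str.lower lb) "_" " ",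
    PySem.Str.replace (PySem.Str.lower lb) "_" ""]

-- one iteration of A's 'for lb in labels' body: the pair appended to hits (if any);
-- 'if idx_list: …min(idx_list)…' — min? is some exactly on a nonempty list
def aHit (lowered : String) (lb : String) : List (Int × String) :=
  let idx_list := ((aCandidates lb).filter (fun c => !(c == ""))).map
    (fun c => PySem.Str.find lowered c)
  let idx_list := idx_list.filter (fun i => decide (0 ≤ i))
  match PySem.List.min? idx_list (fun x => x) with
  | some m => [(m, lb)]
  | none => []

def extract_top_labels_from_text_py (text : String) (labels : List String) : List String :=
  let lowered := PySem.Str.lower text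
  let hits : List (Int × String) := labels.foldl (fun hits lb => hits ++ aHit lowered lb) []
  let ordered := (PySem.List.sorted hits (fun x => x.1) false).map (fun x => x.2)
  ordered.foldl (fun dedup lb => if dedup.contains lb then dedup else dedup ++ [lb]) []

-- ===== PORT B =====
-- '[p for p in dict.fromkeys([low, low.replace("_"," "), low.replace("_","")]) if p]'
def bPatterns (lb : String) : List (List Char) :=
  let low := PySem.Str.lower lb
  ((PySem.List.dedup [low, PySem.Str.replace low "_" " ", PySem.Str.replace low "_" ""]).filter
      (fun p => !(p == ""))).map String.toList

-- first loop of Source B: the pending list of (label, patterns), distinct labels, empty skipped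
def bPending (labels : List String) : List (String × List (List Char)) :=
  (labels.foldl (fun (acc : PySem.Set String × List (String × List (List Char))) lb =>
      if PySem.Set.contains acc.1 lb then acc
      else (PySem.Set.add acc.1 lb,
            if (bPatterns lb).isEmpty then acc.2 else acc.2 ++ [(lb, bPatterns lb)]))
    (PySem.Set.empty, [])).2

-- body of Source B's scan loop; 'lowered.startswith(p, i)' = lowered[i:].startswith(p),
-- exact for the 0 ≤ i ≤ len(lowered) the scan uses
def bStep (lowered : List Char) (st : List String × List (String × List (List Char)))
    (i : Nat) : List String × List (String × List (List Char)) :=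
  st.2.foldl (fun st2 x =>
      if x.2.any (fun p => PySem.Chars.startswith (lowered.drop i) p)
      then (st2.1 ++ [x.1], st2.2)
      else (st2.1, st2.2 ++ [x])) (st.1, [])

def extract_top_labels_from_text_py_alt (text : String) (labels : List String) : List String :=
  let lowered := (PySem.Str.lower text).toList
  ((List.range lowered.length).foldl (bStep lowered) ([], bPending labels)).1

-- ===== PRECONDITION & SPEC =====
def Spec_extract_top_labels_from_text_py (text : String) (labels : List String) (out : List String) : Prop := out = extract_top_labels_from_text_py_alt text labels
instance (text : String) (labels : List String) (out : List String) : Decidable (Spec_extract_top_labels_from_text_py text labels out) := by unfold Spec_extract_top_labels_from_text_py; infer_instance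

-- ===== CLAIM (what is proved, stated in full; the proofs are below) =====
def Claim_equal_extract_top_labels_from_text_py : Prop := ∀ (text : String) (labels : List String), Dom_extract_top_labels_from_text_py text labels → Spec_extract_top_labels_from_text_py text labels (extract_top_labels_from_text_py text labels)

-- ===== LEMMAS AND PROOFS =====

-- 'some variant matches at position i'
def matchAt (low : List Char) (ps : List (List Char)) (i : Nat) : Bool :=
  ps.any (fun p => PySem.Chars.startswith (low.drop i) p)

-- least match position (patterns are nonempty, so any match position is < low.length)
def minIdx (low : List Char) (ps : List (List Char)) : Option Nat :=
  if h : ∃ i, i < low.length ∧ matchAt low ps i = true then some (Nat.find h) else none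

lemma bPatterns_ne_nil : ∀ {lb : String} {p : List Char}, p ∈ bPatterns lb → p ≠ [] := by
  intro lb p hp
  simp only [bPatterns, List.mem_map, List.mem_filter] at hp
  obtain ⟨c, ⟨-, hc⟩, rfl⟩ := hp
  simp only [Bool.not_eq_eq_eq_not, Bool.not_true, beq_eq_false_iff_ne, ne_eq] at hc
  intro h
  exact hc (String.toList_eq_nil_iff.mp h)

lemma matchAt_lt_length {low : List Char} {ps : List (List Char)} {i : Nat}
    (hp : ∀ p ∈ ps, p ≠ []) (h : matchAt low ps i = true) : i < low.length := by
  simp only [matchAt, List.any_eq_true] at h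
  obtain ⟨p, hmem, hsw⟩ := h
  have hpre : p <+: low.drop i := (PySem.Chars.startswith_iff _ _).1 hsw
  have hlen : p.length ≤ (low.drop i).length := hpre.length_le
  have hne : p ≠ [] := hp p hmem
  have : 0 < p.length := List.length_pos_iff.2 hne
  simp only [List.length_drop] at hlen
  omega

lemma minIdx_eq_some_iff {low : List Char} {ps : List (List Char)} {i : Nat}
    (hp : ∀ p ∈ ps, p ≠ []) :
    minIdx low ps = some i ↔ (matchAt low ps i = true ∧ ∀ j < i, matchAt low ps j = false) := by
  unfold minIdx
  split
  case isTrue h =>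
    simp only [Option.some.injEq]
    rw [Nat.find_eq_iff]
    constructor
    · rintro ⟨⟨-, hm⟩, hmin⟩
      refine ⟨hm, fun j hj => ?_⟩
      by_contra hc
      have hj' : matchAt low ps j = true := by simpa using hc
      exact (hmin j hj) ⟨matchAt_lt_length hp hj', hj'⟩
    · rintro ⟨hm, hmin⟩
      exact ⟨⟨matchAt_lt_length hp hm, hm⟩, fun j hj hc => by simp [hmin j hj] at hc⟩
  case isFalse h =>
    constructor
    · intro hc; exact absurd hc (by simp)
    · rintro ⟨hm, -⟩
      exact absurd ⟨i, matchAt_lt_length hp hm, hm⟩ h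

lemma minIdx_eq_none_iff {low : List Char} {ps : List (List Char)}
    (hp : ∀ p ∈ ps, p ≠ []) :
    minIdx low ps = none ↔ ∀ i, matchAt low ps i = false := by
  unfold minIdx
  split
  case isTrue h =>
    obtain ⟨i, -, hm⟩ := h
    exact ⟨fun hc => by simp at hc, fun hall => by simp [hall i] at hm⟩
  case isFalse h =>
    refine ⟨fun _ i => ?_, fun _ => rfl⟩
    by_contra hc
    have : matchAt low ps i = true := by simpa using hc
    exact h ⟨i, matchAt_lt_length hp this, this⟩

lemma matchAt_map_iff (low : List Char) (cs : List String) (j : Nat) :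
    matchAt low (cs.map String.toList) j = true ↔ ∃ c ∈ cs, c.toList <+: low.drop j := by
  simp only [matchAt, List.any_map, List.any_eq_true, Function.comp]
  constructor
  · rintro ⟨c, hc, hsw⟩
    exact ⟨c, hc, (PySem.Chars.startswith_iff _ _).1 hsw⟩
  · rintro ⟨c, hc, hpre⟩
    exact ⟨c, hc, (PySem.Chars.startswith_iff _ _).2 hpre⟩

lemma min_find_eq (s : String) (cs : List String) (hne : ∀ c ∈ cs, c ≠ "") :
    PySem.List.min? ((cs.map (fun c => PySem.Str.find s c)).filter
        (fun i => decide (0 ≤ i))) (fun x => x)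
      = (minIdx s.toList (cs.map String.toList)).map (fun (i : Nat) => (i : Int)) := by
  have hp : ∀ p ∈ cs.map String.toList, p ≠ [] := by
    intro p hp
    obtain ⟨c, hc, rfl⟩ := List.mem_map.1 hp
    simpa [String.toList_eq_nil_iff] using hne c hc
  rcases hmi : minIdx s.toList (cs.map String.toList) with _ | i
  · have hall := (minIdx_eq_none_iff hp).1 hmi
    rw [Option.map_none]
    rw [PySem.List.min?_eq_none_iff]
    rw [List.filter_eq_nil_iff]
    intro a ha
    obtain ⟨c, hc, rfl⟩ := List.mem_map.1 ha
    simp only [decide_eq_true_eq]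
    intro h0
    have hinf : c.toList <:+: s.toList := (PySem.Str.find_nonneg_iff s c).1 h0
    obtain ⟨j, hj⟩ := (PySem.Chars.exists_prefix_drop_iff_isIn c.toList s.toList).2
      ((PySem.Chars.isIn_iff_infix _ _).2 hinf)
    have : matchAt s.toList (cs.map String.toList) j = true :=
      (matchAt_map_iff _ _ _).2 ⟨c, hc, hj⟩
    rw [hall j] at this
    exact Bool.false_ne_true this
  · obtain ⟨hm, hmin⟩ := (minIdx_eq_some_iff hp).1 hmi
    obtain ⟨c, hc, hpre⟩ := (matchAt_map_iff _ _ _).1 hm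
    have hfind : PySem.Str.find s c = (i : Int) := by
      rw [PySem.Str.find_eq]
      have h0 : 0 ≤ PySem.Chars.find s.toList c.toList := by
        rw [PySem.Chars.find_nonneg_iff]
        exact hpre.isInfix.trans (List.drop_suffix i s.toList).isInfix
      obtain ⟨hat, hlow⟩ := PySem.Chars.find_spec h0
      have hge : i ≤ (PySem.Chars.find s.toList c.toList).toNat := by
        by_contra hcl
        have := hmin ((PySem.Chars.find s.toList c.toList).toNat) (by omega)
        rw [(matchAt_map_iff _ _ _).2 ⟨c, hc, hat⟩] at this
        simp at this
      have hle : (PySem.Chars.find s.toList c.toList).toNat ≤ i := by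
        by_contra hcl
        exact hlow i (by omega) hpre
      have heq : (PySem.Chars.find s.toList c.toList).toNat = i := le_antisymm hle hge
      rw [← Int.toNat_of_nonneg h0, heq]
    have hmem : (i : Int) ∈ (cs.map (fun c => PySem.Str.find s c)).filter
        (fun i => decide (0 ≤ i)) := by
      rw [List.mem_filter]
      exact ⟨List.mem_map.2 ⟨c, hc, hfind⟩, by simp⟩
    rcases hmq : PySem.List.min? ((cs.map (fun c => PySem.Str.find s c)).filter
        (fun i => decide (0 ≤ i))) (fun x => x) with _ | m
    · rw [PySem.List.min?_eq_none_iff] at hmq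
      rw [hmq] at hmem
      exact absurd hmem (List.not_mem_nil)
    · have hmmem := PySem.List.min?_mem hmq
      obtain ⟨hmap, h0m⟩ := List.mem_filter.1 hmmem
      obtain ⟨c', hc', hfc'⟩ := List.mem_map.1 hmap
      have h0m' : (0 : Int) ≤ m := by simpa using h0m
      have hge : (i : Int) ≤ m := by
        rw [← hfc', PySem.Str.find_eq] at h0m' ⊢
        obtain ⟨hat, -⟩ := PySem.Chars.find_spec h0m'
        have : matchAt s.toList (cs.map String.toList)
            (PySem.Chars.find s.toList c'.toList).toNat = true :=
          (matchAt_map_iff _ _ _).2 ⟨c', hc', hat⟩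
        have hni : ¬ (PySem.Chars.find s.toList c'.toList).toNat < i := by
          intro hcl
          rw [hmin _ hcl] at this
          exact Bool.false_ne_true this
        omega
      have hle : m ≤ (i : Int) := PySem.List.min?_isMin hmq _ hmem
      have : m = (i : Int) := le_antisymm hle hge
      rw [this]
      rfl

-- A's per-label hit, canonically
lemma aHit_eq (s : String) (lb : String) :
    aHit s lb = (match minIdx s.toList (bPatterns lb) with
      | some i => [((i : Int), lb)] | none => []) := by
  have hcs : ((aCandidates lb).filter (fun c => !(c == "")))
      = (PySem.List.dedup [PySem.Str.lower lb,
          PySem.Str.replace (PySem.Str.lower lb) "_" " ",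
          PySem.Str.replace (PySem.Str.lower lb) "_" ""]).filter (fun c => !(c == "")) := by
    rw [aCandidates, PySem.List.dedup_eq_ofList]
  have hbp : bPatterns lb = ((PySem.List.dedup [PySem.Str.lower lb,
          PySem.Str.replace (PySem.Str.lower lb) "_" " ",
          PySem.Str.replace (PySem.Str.lower lb) "_" ""]).filter
        (fun c => !(c == ""))).map String.toList := rfl
  have hne : ∀ c ∈ (PySem.List.dedup [PySem.Str.lower lb,
          PySem.Str.replace (PySem.Str.lower lb) "_" " ",
          PySem.Str.replace (PySem.Str.lower lb) "_" ""]).filter (fun c => !(c == "")), c ≠ "" := by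
    intro c hc
    have := List.of_mem_filter hc
    simpa using this
  simp only [aHit, hcs]
  rw [min_find_eq s _ hne, hbp]
  rcases minIdx s.toList _ with _ | i <;> rfl

-- keep-first dedup: folding Set.add from a nonempty accumulator
lemma dedup_foldl_add_aux : ∀ (n : Nat) (l : List String), l.length ≤ n → ∀ acc : List String,
    List.foldl PySem.Set.add acc l
      = acc ++ List.foldl PySem.Set.add [] (l.filter (fun y => !acc.contains y)) := by
  intro n
  induction n with
  | zero =>
    intro l hl acc
    have : l = [] := List.eq_nil_of_length_eq_zero (Nat.le_zero.1 hl)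
    subst this; simp
  | succ n ih =>
    intro l hl acc
    match l with
    | [] => simp
    | y :: l' =>
      have hl' : l'.length ≤ n := by simpa using hl
      by_cases hy : acc.contains y = true
      · have hstep : PySem.Set.add acc y = acc := by
          show (if List.contains acc y = true then acc else acc ++ [y]) = acc
          rw [hy]; simp
        simp only [List.foldl_cons, hstep, ih l' hl' acc, List.filter_cons, hy, Bool.not_true]
        simp
      · have hy' : acc.contains y = false := by simpa using hy
        have hadd : PySem.Set.add acc y = acc ++ [y] := by
          show (if List.contains acc y = true then acc else acc ++ [y]) = acc ++ [y]
          rw [hy']; simp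
        have hadd1 : PySem.Set.add ([] : List String) y = [y] := by rfl
        have hflen : (l'.filter (fun z => !acc.contains z)).length ≤ n :=
          le_trans (List.length_filter_le _ _) hl'
        simp only [List.foldl_cons, hadd, ih l' hl' (acc ++ [y]), List.filter_cons, hy',
          Bool.not_false, if_pos, hadd1, ih _ hflen [y]]
        have hfe : (l'.filter (fun z => !(acc ++ [y]).contains z))
            = (l'.filter (fun z => !acc.contains z)).filter
                (fun z => !([y] : List String).contains z) := by
          rw [List.filter_filter]
          apply List.filter_congr
          intro z _
          simp only [List.contains_append, Bool.not_or]
          exact Bool.and_comm _ _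
        rw [hfe, List.append_assoc]

lemma dedup_foldl_add (l : List String) : ∀ acc : List String,
    List.foldl PySem.Set.add acc l
      = acc ++ List.foldl PySem.Set.add [] (l.filter (fun y => !acc.contains y)) :=
  dedup_foldl_add_aux l.length l le_rfl

lemma dedup_cons (x : String) (l : List String) :
    PySem.List.dedup (x :: l) = x :: PySem.List.dedup (l.filter (fun y => !(y == x))) := by
  have h1 : PySem.List.dedup (x :: l) = List.foldl PySem.Set.add [x] l := by
    rw [PySem.List.dedup_eq_ofList]
    simp [PySem.Set.ofList, PySem.Set.empty, PySem.Set.add, PySem.Set.contains]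
  rw [h1, dedup_foldl_add l [x], PySem.List.dedup_eq_ofList, PySem.Set.ofList, PySem.Set.empty]
  simp only [List.cons_append, List.nil_append, List.contains_cons, List.contains_nil,
    Bool.or_false]

lemma dedup_append (u v : List String) :
    PySem.List.dedup (u ++ v)
      = PySem.List.dedup u ++ PySem.List.dedup (v.filter (fun y => !u.contains y)) := by
  simp only [PySem.List.dedup_eq_ofList, PySem.Set.ofList, PySem.Set.empty, List.foldl_append]
  rw [dedup_foldl_add v (List.foldl PySem.Set.add [] u)]
  congr 2
  apply List.filter_congr
  intro z _
  have : (List.foldl PySem.Set.add [] u).contains z = u.contains z := by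
    have := PySem.Set.mem_ofList u z
    simp only [PySem.Set.ofList, PySem.Set.empty] at this
    simp [this]
  exact congrArg (!·) this

lemma dedup_filter_aux (q : String → Bool) :
    ∀ (n : Nat) (l : List String), l.length ≤ n →
      PySem.List.dedup (l.filter q) = (PySem.List.dedup l).filter q := by
  intro n
  induction n with
  | zero =>
    intro l hl
    have : l = [] := List.eq_nil_of_length_eq_zero (Nat.le_zero.1 hl)
    subst this; simp [PySem.List.dedup, PySem.Set.ofList, PySem.Set.empty]
  | succ n ih =>
    intro l hl
    match l with
    | [] => simp [PySem.List.dedup, PySem.Set.ofList, PySem.Set.empty]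
    | x :: l' =>
      have hl' : l'.length ≤ n := by simpa using hl
      have hfl : (l'.filter (fun y => !(y == x))).length ≤ n :=
        le_trans (List.length_filter_le _ _) hl'
      by_cases hx : q x = true
      · rw [List.filter_cons, if_pos hx, dedup_cons, dedup_cons, List.filter_cons, if_pos hx]
        congr 1
        rw [List.filter_filter, ← ih _ hfl]
        congr 1
        rw [List.filter_filter]
        apply List.filter_congr
        intro z _
        exact Bool.and_comm _ _
      · have hx' : q x = false := by simpa using hx
        rw [List.filter_cons, if_neg (by simp [hx']), dedup_cons, List.filter_cons,
          if_neg (by simp [hx']), ← ih _ hfl]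
        congr 1
        rw [List.filter_comm]
        symm
        apply List.filter_eq_self.mpr
        intro y hy
        have hqy : q y = true := List.of_mem_filter hy
        simp only [Bool.not_eq_eq_eq_not, Bool.not_true, beq_eq_false_iff_ne, ne_eq]
        rintro rfl
        rw [hx'] at hqy; exact Bool.false_ne_true hqy

lemma dedup_filter (q : String → Bool) (l : List String) :
    PySem.List.dedup (l.filter q) = (PySem.List.dedup l).filter q :=
  dedup_filter_aux q l.length l le_rfl

-- buckets are label-disjoint, so dedup distributes over their concatenation
lemma dedup_flatMap_disjoint (b : Nat → List String) (F : String → Option Nat)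
    (hb : ∀ i y, y ∈ b i → F y = some i) :
    ∀ is : List Nat, is.Nodup →
      PySem.List.dedup (is.flatMap b) = is.flatMap (fun i => PySem.List.dedup (b i)) := by
  intro is
  induction is with
  | nil => intro _; simp [PySem.List.dedup, PySem.Set.ofList, PySem.Set.empty]
  | cons i is ih =>
    intro hnd
    have hnd' : is.Nodup := hnd.of_cons
    have hni : i ∉ is := (List.nodup_cons.1 hnd).1
    rw [List.flatMap_cons, dedup_append]
    have hfe : ((is.flatMap b).filter (fun y => !(b i).contains y)) = is.flatMap b := by
      apply List.filter_eq_self.mpr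
      intro y hy
      obtain ⟨j, hj, hyb⟩ := List.mem_flatMap.1 hy
      simp only [Bool.not_eq_eq_eq_not]
      by_contra hc
      have hmem : y ∈ b i := by simpa using hc
      have h2 := hb j y hyb
      rw [hb i y hmem] at h2
      have hij : i = j := Option.some.inj h2
      exact hni (hij ▸ hj)
    rw [hfe, ih hnd', List.flatMap_cons]

-- the partition loop inside bStep
lemma foldl_partition (q : String × List (List Char) → Bool)
    (pend : List (String × List (List Char))) :
    ∀ res acc, pend.foldl (fun st2 x =>
        if q x then (st2.1 ++ [x.1], st2.2) else (st2.1, st2.2 ++ [x])) (res, acc)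
      = (res ++ (pend.filter q).map Prod.fst, acc ++ pend.filter (fun x => !q x)) := by
  induction pend with
  | nil => intro res acc; simp
  | cons x pend ih =>
    intro res acc
    by_cases hx : q x = true
    · simp only [List.foldl_cons, hx, if_pos, ih, List.filter_cons, Bool.not_true]
      simp
    · have hx' : q x = false := by simpa using hx
      simp only [List.foldl_cons, hx', Bool.false_eq_true, ih, List.filter_cons,
        Bool.not_false]
      simp

-- first loop of Source B: pending = deduped labels with nonempty patterns
lemma bPending_aux (labels : List String) :
    ∀ (sacc : PySem.Set String) (acc : List (String × List (List Char))),
    (labels.foldl (fun (acc : PySem.Set String × List (String × List (List Char))) lb =>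
        if PySem.Set.contains acc.1 lb then acc
        else (PySem.Set.add acc.1 lb,
              if (bPatterns lb).isEmpty then acc.2 else acc.2 ++ [(lb, bPatterns lb)]))
      (sacc, acc)).2
      = acc ++ ((PySem.List.dedup (labels.filter (fun lb => !sacc.contains lb))).filter
          (fun lb => !(bPatterns lb).isEmpty)).map (fun lb => (lb, bPatterns lb)) := by
  induction labels with
  | nil => intro sacc acc; simp [PySem.List.dedup, PySem.Set.ofList, PySem.Set.empty]
  | cons x l ih =>
    intro sacc acc
    by_cases hx : List.contains sacc x = true
    · have hcond : PySem.Set.contains sacc x = true := hx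
      rw [List.foldl_cons, if_pos hcond, ih, List.filter_cons, if_neg (by simpa using hx)]
    · have hx' : List.contains sacc x = false := by simpa using hx
      have hcond : ¬ PySem.Set.contains sacc x = true := hx
      have hadd : PySem.Set.add sacc x = sacc ++ [x] := by
        show (if List.contains sacc x = true then sacc else sacc ++ [x]) = sacc ++ [x]
        rw [if_neg hx]
      rw [List.foldl_cons, if_neg hcond]
      simp only [hadd, ih]
      have hsplit : (l.filter (fun lb => !(sacc ++ [x]).contains lb))
          = (l.filter (fun lb => !sacc.contains lb)).filter (fun y => !(y == x)) := by
        rw [List.filter_filter]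
        apply List.filter_congr
        intro z _
        simp only [PySem.Set.contains, List.contains_append, Bool.not_or, List.contains_cons,
          List.contains_nil, Bool.or_false]
        exact Bool.and_comm _ _
      rw [hsplit]
      have hded : PySem.List.dedup ((x :: l).filter (fun lb => !sacc.contains lb))
          = x :: PySem.List.dedup ((l.filter (fun lb => !sacc.contains lb)).filter
              (fun y => !(y == x))) := by
        rw [List.filter_cons, if_pos (by simp only [PySem.Set.contains, hx', Bool.not_false]), dedup_cons]
      rw [hded, List.filter_cons]
      by_cases he : (bPatterns x).isEmpty = true
      · rw [if_pos he, if_neg (by simp [he])]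
      · rw [if_neg he, if_pos (by simpa using he), List.map_cons]
        simp

lemma bPending_eq (labels : List String) :
    bPending labels
      = ((PySem.List.dedup labels).filter (fun lb => !(bPatterns lb).isEmpty)).map
          (fun lb => (lb, bPatterns lb)) := by
  unfold bPending
  rw [show (PySem.Set.empty : PySem.Set String) = ([] : List String) from rfl, bPending_aux]
  simp

-- stable insertion: inserting after everything not-before and before everything before
lemma insertBy_split (before : (Int × String) → (Int × String) → Bool) (x : Int × String) :
    ∀ ys1 ys2 : List (Int × String), (∀ y ∈ ys1, before x y = false) →
      (∀ y ∈ ys2, before x y = true) →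
      PySem.List.insertBy before x (ys1 ++ ys2) = ys1 ++ x :: ys2 := by
  intro ys1
  induction ys1 with
  | nil =>
    intro ys2 _ h2
    cases ys2 with
    | nil => rfl
    | cons y ys =>
      have hy : before x y = true := h2 y List.mem_cons_self
      simp [PySem.List.insertBy, hy]
  | cons z ys1 ih =>
    intro ys2 h1 h2
    have hz : before x z = false := h1 z List.mem_cons_self
    simp only [List.cons_append, PySem.List.insertBy, hz, Bool.false_eq_true]
    exact congrArg (z :: ·) (ih ys2 (fun y hy => h1 y (List.mem_cons_of_mem z hy)) h2)

-- stable sort on small-nat keys = bucket concatenation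
lemma sorted_eq_buckets (n : Nat) (hs : List (Int × String))
    (hk : ∀ h ∈ hs, ∃ k : Nat, h.1 = (k : Int) ∧ k < n) :
    PySem.List.sorted hs (fun x => x.1) false
      = (List.range n).flatMap (fun (i : Nat) => hs.filter (fun h => h.1 == (i : Int))) := by
  rw [PySem.List.sorted_eq_foldl_insertBy]
  induction hs using List.reverseRecOn with
  | nil => simp
  | append_singleton l x ih =>
    have hkl : ∀ h ∈ l, ∃ k : Nat, h.1 = (k : Int) ∧ k < n :=
      fun h hm => hk h (List.mem_append_left _ hm)
    obtain ⟨k, hxk, hkn⟩ := hk x (List.mem_append_right _ List.mem_cons_self)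
    rw [List.foldl_append, List.foldl_cons, List.foldl_nil, ih hkl]
    have hrange : List.range n = List.range (k + 1) ++ List.range' (k + 1) (n - (k + 1)) := by
      rw [List.range_eq_range', List.range_eq_range']
      have := List.range'_append (s := 0) (m := k + 1) (n := n - (k + 1)) (step := 1)
      simp only [Nat.one_mul, Nat.zero_add] at this
      have h2 : k + 1 + (n - (k + 1)) = n := by omega
      rw [h2] at this
      exact this.symm
    set F : Nat → List (Int × String) := fun (i : Nat) => l.filter (fun h => h.1 == (i : Int)) with hF
    have key1 : ∀ y ∈ (List.range (k + 1)).flatMap F,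
        (fun a b : Int × String => decide (a.1 < b.1)) x y = false := by
      intro y hy
      obtain ⟨i, hi, hyf⟩ := List.mem_flatMap.1 hy
      have hik : i ≤ k := by simpa [Nat.lt_succ_iff] using List.mem_range.1 hi
      have hyi : y.1 = (i : Int) := by
        have := (List.mem_filter.1 hyf).2
        exact eq_of_beq this
      simp only [hxk, hyi, decide_eq_false_iff_not, not_lt]
      exact_mod_cast hik
    have key2 : ∀ y ∈ (List.range' (k + 1) (n - (k + 1))).flatMap F,
        (fun a b : Int × String => decide (a.1 < b.1)) x y = true := by
      intro y hy
      obtain ⟨i, hi, hyf⟩ := List.mem_flatMap.1 hy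
      have hik : k + 1 ≤ i := (List.mem_range'_1.1 hi).1
      have hyi : y.1 = (i : Int) := by
        have := (List.mem_filter.1 hyf).2
        exact eq_of_beq this
      simp only [hxk, hyi, decide_eq_true_eq]
      exact_mod_cast hik
    rw [hrange, List.flatMap_append, insertBy_split _ _ _ _ key1 key2]
    have hGlow : (List.range (k + 1)).flatMap
          (fun (i : Nat) => (l ++ [x]).filter (fun h => h.1 == (i : Int)))
        = (List.range (k + 1)).flatMap F ++ [x] := by
      rw [List.range_succ, List.flatMap_append, List.flatMap_append]
      have hlow : (List.range k).flatMap (fun (i : Nat) => (l ++ [x]).filter (fun h => h.1 == (i : Int)))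
          = (List.range k).flatMap F := by
        apply List.flatMap_congr
        intro i hi
        have hik : i < k := List.mem_range.1 hi
        rw [List.filter_append]
        have : ([x].filter (fun h => h.1 == (i : Int))) = [] := by
          simp only [List.filter_cons, List.filter_nil, hxk]
          rw [if_neg]
          simp only [Int.natCast_inj, beq_iff_eq]
          omega
        rw [this, List.append_nil]
      have hatk : [k].flatMap (fun (i : Nat) => (l ++ [x]).filter (fun h => h.1 == (i : Int)))
          = F k ++ [x] := by
        simp only [List.flatMap_cons, List.flatMap_nil, List.append_nil, List.filter_append]
        congr 1
        simp [hxk]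
      rw [hlow, hatk, List.append_assoc]
      simp
    have hGhigh : (List.range' (k + 1) (n - (k + 1))).flatMap
          (fun (i : Nat) => (l ++ [x]).filter (fun h => h.1 == (i : Int)))
        = (List.range' (k + 1) (n - (k + 1))).flatMap F := by
      apply List.flatMap_congr
      intro i hi
      have hik : k + 1 ≤ i := (List.mem_range'_1.1 hi).1
      rw [List.filter_append]
      have : ([x].filter (fun h => h.1 == (i : Int))) = [] := by
        simp only [List.filter_cons, List.filter_nil, hxk]
        rw [if_neg]
        simp only [Int.natCast_inj, beq_iff_eq]
        omega
      rw [this, List.append_nil]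
    rw [List.flatMap_append, hGlow, hGhigh]
    simp

-- A's bucket i, after projecting away the index
lemma bucket_map_snd (s : String) (labels : List String) (i : Nat) :
    (((labels.flatMap (aHit s)).filter (fun h => h.1 == (i : Int))).map Prod.snd)
      = labels.filter (fun lb => decide (minIdx s.toList (bPatterns lb) = some i)) := by
  induction labels with
  | nil => simp
  | cons lb l ih =>
    rw [List.flatMap_cons, List.filter_append, List.map_append, ih, aHit_eq]
    rcases hmi : minIdx s.toList (bPatterns lb) with _ | j
    · simp [hmi]
    · by_cases hij : j = i
      · subst hij
        simp [hmi]
      · simp [hmi, hij]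

-- B's scan, solved
lemma pend_filter_fst (low : List Char) (m : Nat) (P : String → List (List Char)) :
    ∀ ls : List String,
    ((ls.map (fun lb => (lb, P lb))).filter
        (fun x => x.2.any (fun p => PySem.Chars.startswith (low.drop m) p))).map Prod.fst
      = ls.filter (fun lb => matchAt low (P lb) m) := by
  intro ls
  unfold matchAt
  induction ls with
  | nil => rfl
  | cons a t ih =>
    simp only [List.map_cons, List.filter_cons]
    cases h : (P a).any (fun p => PySem.Chars.startswith (low.drop m) p) with
    | true => simp only [if_pos, List.map_cons, ih]
    | false => simp [ih]

lemma pend_filter_not (low : List Char) (m : Nat) (P : String → List (List Char)) :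
    ∀ ls : List String,
    ((ls.map (fun lb => (lb, P lb))).filter
        (fun x => !x.2.any (fun p => PySem.Chars.startswith (low.drop m) p)))
      = (ls.filter (fun lb => !matchAt low (P lb) m)).map (fun lb => (lb, P lb)) := by
  intro ls
  unfold matchAt
  induction ls with
  | nil => rfl
  | cons a t ih =>
    simp only [List.map_cons, List.filter_cons]
    cases h : (P a).any (fun p => PySem.Chars.startswith (low.drop m) p) with
    | true => simp [ih]
    | false => simp only [Bool.not_false, if_pos, List.map_cons, ih]

lemma scan_aux (low : List Char) (P : String → List (List Char))
    (hp : ∀ lb : String, ∀ p ∈ P lb, p ≠ []) (dls : List String) :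
    ∀ m, (List.range m).foldl (bStep low) ([], dls.map (fun lb => (lb, P lb)))
      = ((List.range m).flatMap
            (fun i => dls.filter (fun lb => decide (minIdx low (P lb) = some i))),
          (dls.filter (fun lb => decide (∀ j, j < m → matchAt low (P lb) j = false))).map
            (fun lb => (lb, P lb))) := by
  intro m
  induction m with
  | zero =>
    simp only [List.range_zero, List.foldl_nil, List.flatMap_nil]
    congr 1
    symm
    congr 1
    apply List.filter_eq_self.mpr
    intro lb _
    simp
  | succ m ih =>
    rw [List.range_succ, List.foldl_append, ih, List.foldl_cons, List.foldl_nil]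
    unfold bStep
    rw [foldl_partition, Prod.mk.injEq]
    refine ⟨?_, ?_⟩
    · rw [List.flatMap_append, List.flatMap_cons, List.flatMap_nil, List.append_nil]
      congr 1
      rw [pend_filter_fst, List.filter_filter]
      apply List.filter_congr
      intro lb _
      beta_reduce
      have hiff := minIdx_eq_some_iff (low := low) (ps := P lb) (i := m) (hp lb)
      cases hma : matchAt low (P lb) m with
      | false =>
        simp only [Bool.false_and]
        symm
        simp only [decide_eq_false_iff_not]
        intro hc
        have := (hiff.1 hc).1
        rw [hma] at this
        simp at this
      | true =>
        simp only [Bool.true_and]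
        rw [decide_eq_decide]
        exact ⟨fun hall => hiff.2 ⟨hma, hall⟩, fun hc => (hiff.1 hc).2⟩
    · rw [List.nil_append, pend_filter_not, List.filter_filter]
      congr 1
      apply List.filter_congr
      intro lb _
      beta_reduce
      cases hma : matchAt low (P lb) m with
      | false =>
        simp only [Bool.not_false, Bool.true_and]
        rw [decide_eq_decide]
        constructor
        · intro h j hj
          rcases Nat.lt_succ_iff_lt_or_eq.1 hj with h' | h'
          · exact h j h'
          · subst h'; exact hma
        · intro h j hj
          exact h j (Nat.lt_succ_of_lt hj)
      | true =>
        simp only [Bool.not_true, Bool.false_and]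
        symm
        simp only [decide_eq_false_iff_not]
        intro hc
        have := hc m (Nat.lt_succ_self m)
        rw [hma] at this
        simp at this

lemma scan_eq (low : List Char) (dls : List String) :
    ∀ m, ((List.range m).foldl (bStep low)
        ([], dls.map (fun lb => (lb, bPatterns lb)))).1
      = (List.range m).flatMap
          (fun i => dls.filter (fun lb => decide (minIdx low (bPatterns lb) = some i))) := by
  intro m
  rw [scan_aux low bPatterns (fun lb p h => bPatterns_ne_nil h) dls m]

lemma minIdx_lt {low : List Char} {ps : List (List Char)} {i : Nat}
    (h : minIdx low ps = some i) : i < low.length := by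
  unfold minIdx at h
  split at h
  case isTrue hex =>
    have := Nat.find_spec hex
    cases h
    exact this.1
  case isFalse => cases h

lemma minIdx_some_ne_nil {low : List Char} {ps : List (List Char)} {i : Nat}
    (h : minIdx low ps = some i) : ps ≠ [] := by
  unfold minIdx at h
  split at h
  case isTrue hex =>
    obtain ⟨j, -, hm⟩ := hex
    simp only [matchAt, List.any_eq_true] at hm
    obtain ⟨p, hp, -⟩ := hm
    exact List.ne_nil_of_mem hp
  case isFalse => cases h

lemma foldl_dedup (l : List String) :
    l.foldl (fun d lb => if d.contains lb then d else d ++ [lb]) [] = PySem.List.dedup l := by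
  rw [PySem.List.dedup_eq_ofList]
  rfl

-- ===== VERDICT (by name: the statement is the Claim_ definition above) =====
theorem extract_top_labels_from_text_py_spec : Claim_equal_extract_top_labels_from_text_py := by
  unfold Claim_equal_extract_top_labels_from_text_py
  intro text labels _
  unfold Spec_extract_top_labels_from_text_py
  have hmid :
      extract_top_labels_from_text_py text labels
        = (List.range (PySem.Str.lower text).toList.length).flatMap
            (fun (i : Nat) => (PySem.List.dedup labels).filter
              (fun lb => decide (minIdx (PySem.Str.lower text).toList (bPatterns lb)
                = some i))) := by
    simp only [extract_top_labels_from_text_py]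
    rw [PySem.List.foldl_append_eq_flatMap, List.nil_append]
    have hk : ∀ h ∈ labels.flatMap (aHit (PySem.Str.lower text)),
        ∃ k : Nat, h.1 = (k : Int) ∧ k < (PySem.Str.lower text).toList.length := by
      intro h hm
      obtain ⟨lb, -, hal⟩ := List.mem_flatMap.1 hm
      rw [aHit_eq] at hal
      rcases hmi : minIdx (PySem.Str.lower text).toList (bPatterns lb) with _ | i
      · rw [hmi] at hal
        simp at hal
      · rw [hmi] at hal
        simp only [List.mem_singleton] at hal
        subst hal
        exact ⟨i, rfl, minIdx_lt hmi⟩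
    rw [sorted_eq_buckets _ _ hk, List.map_flatMap]
    have hbk : ∀ i ∈ List.range (PySem.Str.lower text).toList.length,
        (((labels.flatMap (aHit (PySem.Str.lower text))).filter
            (fun h => h.1 == (i : Int))).map Prod.snd)
          = labels.filter (fun lb => decide (minIdx (PySem.Str.lower text).toList
              (bPatterns lb) = some i)) := fun i _ => bucket_map_snd _ _ _
    rw [List.flatMap_congr hbk, foldl_dedup,
      dedup_flatMap_disjoint _ (fun lb => minIdx (PySem.Str.lower text).toList (bPatterns lb))
        (by
          intro i y hy
          have := List.of_mem_filter hy
          exact of_decide_eq_true this)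
        _ (List.nodup_range)]
    apply List.flatMap_congr
    intro i _
    exact dedup_filter _ _
  have hmid' :
      extract_top_labels_from_text_py_alt text labels
        = (List.range (PySem.Str.lower text).toList.length).flatMap
            (fun (i : Nat) => (PySem.List.dedup labels).filter
              (fun lb => decide (minIdx (PySem.Str.lower text).toList (bPatterns lb)
                = some i))) := by
    simp only [extract_top_labels_from_text_py_alt]
    rw [bPending_eq, scan_eq]
    apply List.flatMap_congr
    intro i _
    rw [List.filter_filter]
    apply List.filter_congr
    intro lb _
    cases hpi : decide (minIdx (PySem.Str.lower text).toList (bPatterns lb) = some i) with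
    | false => rw [Bool.false_and]
    | true =>
      rw [Bool.true_and]
      have hmi := of_decide_eq_true hpi
      have hne : bPatterns lb ≠ [] := minIdx_some_ne_nil hmi
      simp [hne]
  rw [hmid, hmid']
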